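-- pv_equiv track=rewrite | github.com/Jerempire/gym-anything | benchmarks/cua_world/environments/graphite_env/tasks/cpu_budget_allocation_dashboard/verifier.py | _find_graph
-- ===== SOURCE A (Python) =====
-- def _find_graph(graphs, expected_title):
--     """Find a graph by exact title, then case-insensitive. Returns (title, targets, params) or None."""
--     for title, targets, params in graphs:
--         if title == expected_title:
--             return title, targets, params
--     for title, targets, params in graphs:
--         if expected_title.lower() in title.lower():
--             return title, targets, params
--     return None
-- ===== SOURCE B (Python) =====
-- def _find_graph(graphs, expected_title):
--     """Single pass: exact match returns immediately; first case-insensitive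
--     substring match is stored as a fallback and returned after the loop."""
--     needle = expected_title.lower()
--     candidate = None
--     for title, targets, params in graphs:
--         if title == expected_title:
--             return title, targets, params
--         if candidate is None and needle in title.lower():
--             candidate = (title, targets, params)
--     return candidate
-- ===== Notes on version B (the rewrite author's own statement) =====
-- stated objective: simpler
-- what changed: Replaces A's two sequential passes (exact pass, then substring pass) by a single pass that returns an exact match immediately and keeps the first substring match as a fallback candidate.
import Mathlib
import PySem

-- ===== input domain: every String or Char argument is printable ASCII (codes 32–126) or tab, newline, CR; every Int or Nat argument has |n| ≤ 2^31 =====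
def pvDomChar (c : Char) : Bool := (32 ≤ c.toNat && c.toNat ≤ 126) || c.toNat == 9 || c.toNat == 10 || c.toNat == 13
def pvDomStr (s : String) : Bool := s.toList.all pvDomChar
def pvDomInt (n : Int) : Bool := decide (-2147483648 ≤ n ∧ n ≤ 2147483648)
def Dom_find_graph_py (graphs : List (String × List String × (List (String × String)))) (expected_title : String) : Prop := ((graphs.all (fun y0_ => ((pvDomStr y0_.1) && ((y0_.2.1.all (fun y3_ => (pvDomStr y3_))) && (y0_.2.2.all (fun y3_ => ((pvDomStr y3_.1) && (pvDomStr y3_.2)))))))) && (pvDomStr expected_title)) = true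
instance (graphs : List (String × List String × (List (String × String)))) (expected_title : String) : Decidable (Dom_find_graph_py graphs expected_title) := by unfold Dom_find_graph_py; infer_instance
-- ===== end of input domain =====

-- B replaces A's two sequential passes with one pass that returns an exact title match
-- immediately and keeps the first case-insensitive substring match as a fallback (objective: simpler).


-- ===== PORT A =====
-- first loop of A: return the first row whose title equals expected_title
def pvFindExact (graphs : List (String × List String × (List (String × String)))) (expected_title : String) : Option (String × List String × (List (String × String))) :=
  match graphs with
  | [] => none
  | g :: rest => if g.1 == expected_title then some g else pvFindExact rest expected_title

-- second loop of A: return the first row with a case-insensitive substring match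
def pvFindSub (graphs : List (String × List String × (List (String × String)))) (expected_title : String) : Option (String × List String × (List (String × String))) :=
  match graphs with
  | [] => none
  | g :: rest => if PySem.Str.isIn (PySem.Str.lower expected_title) (PySem.Str.lower g.1) then some g else pvFindSub rest expected_title

def find_graph_py (graphs : List (String × List String × (List (String × String)))) (expected_title : String) : Option (String × List String × (List (String × String))) :=
  match pvFindExact graphs expected_title with
  | some g => some g
  | none => pvFindSub graphs expected_title

-- ===== PORT B =====
-- B's single pass with a fallback candidate accumulator
def pvAltLoop (graphs : List (String × List String × (List (String × String)))) (needle expected_title : String) (cand : Option (String × List String × (List (String × String)))) : Option (String × List String × (List (String × String))) :=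
  match graphs with
  | [] => cand
  | g :: rest =>
    if g.1 == expected_title then some g
    else pvAltLoop rest needle expected_title
      (if cand.isNone && PySem.Str.isIn needle (PySem.Str.lower g.1) then some g else cand)

def find_graph_py_alt (graphs : List (String × List String × (List (String × String)))) (expected_title : String) : Option (String × List String × (List (String × String))) :=
  pvAltLoop graphs (PySem.Str.lower expected_title) expected_title none

-- ===== PRECONDITION & SPEC =====
def Spec_find_graph_py (graphs : List (String × List String × (List (String × String)))) (expected_title : String) (out : Option (String × List String × (List (String × String)))) : Prop := out = find_graph_py_alt graphs expected_title
instance (graphs : List (String × List String × (List (String × String)))) (expected_title : String) (out : Option (String × List String × (List (String × String)))) : Decidable (Spec_find_graph_py graphs expected_title out) := by unfold Spec_find_graph_py; infer_instance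

-- ===== CLAIM (what is proved, stated in full; the proofs are below) =====
def Claim_equal_find_graph_py : Prop := ∀ (graphs : List (String × List String × (List (String × String)))) (expected_title : String), Dom_find_graph_py graphs expected_title → Spec_find_graph_py graphs expected_title (find_graph_py graphs expected_title)

-- ===== LEMMAS AND PROOFS =====
theorem pvAltLoop_eq (graphs : List (String × List String × (List (String × String)))) (expected_title : String) (cand : Option (String × List String × (List (String × String)))) :
    pvAltLoop graphs (PySem.Str.lower expected_title) expected_title cand =
      match pvFindExact graphs expected_title with
      | some g => some g
      | none => cand.orElse (fun _ => pvFindSub graphs expected_title) := by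
  induction graphs generalizing cand with
  | nil => cases cand <;> simp [pvAltLoop, pvFindExact, pvFindSub, Option.orElse]
  | cons g rest ih =>
    by_cases he : g.1 == expected_title
    · simp [pvAltLoop, pvFindExact, he]
    · simp only [pvAltLoop, pvFindExact, pvFindSub, he, ih]
      by_cases hs : PySem.Chars.isIn (PySem.Chars.lower expected_title.toList) (PySem.Chars.lower g.1.toList) = true <;>
        cases cand <;> cases pvFindExact rest expected_title <;>
        simp [hs, Option.orElse, PySem.Str.isIn, PySem.Str.lower]

-- ===== VERDICT (by name: the statement is the Claim_ definition above) =====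
theorem find_graph_py_spec : Claim_equal_find_graph_py := by
  intro graphs expected_title _
  unfold Spec_find_graph_py find_graph_py find_graph_py_alt
  rw [pvAltLoop_eq]
  cases pvFindExact graphs expected_title <;> simp [Option.orElse]
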